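-- pv_equiv track=rewrite | github.com/CiceroEduardo84/Computer_Science_2023.2 | Estrutura de dados-Py/02-listas-pilhas-filas-deques/Module-01/list-alocation-contiguous.py | insereOrdenada
-- ===== SOURCE A (Python) =====
-- def insereOrdenada(k, L, n):
--     i = 0
--     posInsercao = -1
--     while (i < n):
--         if L[i] >= k:
--             if L[i] == k:
--                 return -1
--             else:
--                 posInsercao = i
--                 i = n+1
--         else:
--             i = i+1
--             if i == n:
--                 posInsercao = n
--     L.append('')
--     i = n
--     while (i > posInsercao):
--         L[i] = L[i-1]
--         i -= 1
--     L[posInsercao] = k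
--     return posInsercao
-- ===== SOURCE B (Python) =====
-- def insereOrdenada(k, L, n):
--     # Binary search (bisect_left by hand, no imports) over the sorted prefix
--     # L[0:n] instead of A's linear scan; list.insert instead of A's manual shift.
--     if n <= 0:
--         return -1  # empty or malformed prefix: no insertion, signal -1
--     lo, hi = 0, n
--     while lo < hi:
--         mid = (lo + hi) // 2
--         if L[mid] < k:
--             lo = mid + 1
--         else:
--             hi = mid
--     if lo < n and L[lo] == k:
--         return -1
--     L.insert(lo, k)
--     return lo
-- ===== Notes on version B (the rewrite author's own statement) =====
-- stated objective: alternative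
-- what changed: Replaces A's linear first->=k scan by a hand-rolled bisect_left binary search over the sorted prefix L[0:n] (with an explicit guard signalling -1 for a non-positive n, where nothing is inserted), and A's append('')-plus-manual-shift loop by a single list.insert.
-- outside the precondition, e.g. on insereOrdenada(2, [5, 1, 3], 3): A returns 0, B returns 2; on insereOrdenada(2, [2, 5], 5): A returns -1, B raises IndexError
import Mathlib
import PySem

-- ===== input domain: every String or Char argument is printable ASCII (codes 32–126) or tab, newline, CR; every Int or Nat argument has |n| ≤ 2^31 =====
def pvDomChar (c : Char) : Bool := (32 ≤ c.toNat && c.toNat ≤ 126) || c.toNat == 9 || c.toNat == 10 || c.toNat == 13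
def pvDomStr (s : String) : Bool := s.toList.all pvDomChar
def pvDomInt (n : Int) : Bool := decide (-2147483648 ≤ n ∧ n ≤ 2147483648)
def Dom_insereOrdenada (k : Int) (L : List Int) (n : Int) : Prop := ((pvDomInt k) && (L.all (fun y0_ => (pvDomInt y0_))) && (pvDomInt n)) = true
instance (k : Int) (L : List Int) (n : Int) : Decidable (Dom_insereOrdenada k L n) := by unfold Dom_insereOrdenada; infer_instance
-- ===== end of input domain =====

-- B replaces A's linear scan by a binary search (bisect_left by hand) over the
-- sorted prefix L[0:n] and A's manual shift loop by list.insert.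
-- Both A and B mutate L in place in Python; the theorems below are about the
-- RETURN value only (for the well-formed call 0 < n == len(L) the mutations
-- coincide; for n < len(L) A overwrites L[n] where B inserts, and for n ≤ 0
-- A still appends and writes through negative indices while B leaves L alone).

-- ===== PORT A =====
-- A's first while loop, state (i, posInsercao); A's append/shift tail only
-- mutates L (never raising on Pre_'s inputs) and the function returns
-- posInsercao, so the port returns the loop's final posInsercao.
def insereOrdenadaGo (k : Int) (L : List Int) (n : Int) (i pos : Int) : Int :=
  if _h : i < n then
    match PySem.List.pyGet? L i with
    | some v =>
      if v ≥ k then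
        if v = k then -1
        else insereOrdenadaGo k L n (n + 1) i      -- posInsercao = i; i = n+1
      else
        if i + 1 = n then insereOrdenadaGo k L n (i + 1) n
        else insereOrdenadaGo k L n (i + 1) pos
    | none => -1      -- Python IndexError (n > len(L)); excluded by Pre_
  else pos
termination_by (n - i).toNat
decreasing_by all_goals omega

def insereOrdenada (k : Int) (L : List Int) (n : Int) : Int :=
  insereOrdenadaGo k L n 0 (-1)

-- ===== PORT B =====
-- B's while loop: bisect_left by hand — while lo < hi: mid = (lo+hi)//2;
-- if L[mid] < k: lo = mid+1 else hi = mid.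
def bisGo (k : Int) (L : List Int) (lo hi : Int) : Int :=
  if _h : lo < hi then
    let mid := PySem.Int.floordiv (lo + hi) 2
    match PySem.List.pyGet? L mid with
    | some v => if v < k then bisGo k L (mid + 1) hi else bisGo k L lo mid
    | none => 0      -- Python IndexError (n > len(L)); excluded by Pre_
  else lo
termination_by (hi - lo).toNat
decreasing_by
  all_goals
    obtain ⟨h1, h2⟩ := PySem.Int.floordiv_two_mid_bounds (lo := lo) (hi := hi) (by omega)
    have h3 := (PySem.Int.floordiv_lt_iff_lt_mul (a := lo + hi) (b := 2) (q := hi) (by omega)).mpr (by omega)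
    omega

def insereOrdenada_alt (k : Int) (L : List Int) (n : Int) : Int :=
  if n ≤ 0 then -1      -- empty or malformed prefix: no insertion, signal -1
  else
    let pos := bisGo k L 0 n
    if pos < n ∧ PySem.List.pyGet? L pos = some k then -1 else pos

-- ===== PRECONDITION & SPEC =====
-- The function's contract is insertion into a SORTED prefix of length n: Pre_
-- restricts to that natural domain, n ≤ len(L) with L[0:n] nondecreasing
-- (for n ≤ 0 the prefix is empty, and both programs return -1 unchanged).
-- It excludes (a) unsorted prefixes, on which A still returns the artifact of
-- its left-to-right scan, (b) calls with n > len(L), on which A raises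
-- IndexError unless its scan meets a duplicate first (then A returns -1 while
-- B's binary search still raises).
def Pre_insereOrdenada (k : Int) (L : List Int) (n : Int) : Prop :=
  n ≤ (L.length : Int) ∧ (L.take n.toNat).Pairwise (· ≤ ·)
instance (k : Int) (L : List Int) (n : Int) : Decidable (Pre_insereOrdenada k L n) := by
  unfold Pre_insereOrdenada; infer_instance

def pvWitness_insereOrdenada : Int × List Int × Int := (3, [1, 2, 4], 3)

def Spec_insereOrdenada (k : Int) (L : List Int) (n : Int) (out : Int) : Prop :=
  out = insereOrdenada_alt k L n
instance (k : Int) (L : List Int) (n : Int) (out : Int) : Decidable (Spec_insereOrdenada k L n out) := by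
  unfold Spec_insereOrdenada; infer_instance

-- ===== CLAIM (what is proved, stated in full; the proofs are below) =====
def Claim_equal_insereOrdenada : Prop := ∀ (k : Int) (L : List Int) (n : Int), Dom_insereOrdenada k L n → Pre_insereOrdenada k L n → Spec_insereOrdenada k L n (insereOrdenada k L n)

-- ===== LEMMAS AND PROOFS =====

-- Proof-side helper: the first index i ≤ j < n with L[j] ≥ k, as a left-to-right
-- scan (A's loop computes this; B's binary search is proved to compute it too).
def linScan (k : Int) (L : List Int) (n : Int) (i : Int) : Option Int :=
  if _h : i < n then
    match PySem.List.pyGet? L i with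
    | some v => if v ≥ k then some i else linScan k L n (i + 1)
    | none => none
  else none
termination_by (n - i).toNat
decreasing_by omega

-- Loop invariant for A: from any 0 ≤ i < n ≤ len(L), A's loop computes exactly
-- "first index ≥ i with element ≥ k, else n" followed by the duplicate test;
-- the result is independent of the carried pos.
theorem go_eq (k : Int) (L : List Int) (n : Int) (hn : n ≤ (L.length : Int))
    (i pos : Int) (h0 : 0 ≤ i) (hin : i < n) :
    insereOrdenadaGo k L n i pos =
      (let p := (linScan k L n i).getD n
       if p < n ∧ PySem.List.pyGet? L p = some k then -1 else p) := by
  have hget : PySem.List.pyGet? L i = some (L[i.toNat]'(by omega)) :=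
    PySem.List.pyGet?_eq_some_getElem L h0 (by omega)
  rw [insereOrdenadaGo, linScan]
  simp only [dif_pos hin, hget]
  by_cases hge : L[i.toNat]'(by omega) ≥ k
  · by_cases heq : L[i.toNat]'(by omega) = k
    · simp only [if_pos hge, if_pos heq, Option.getD_some]
      rw [if_pos ⟨hin, by rw [hget, heq]⟩]
    · have hexit : insereOrdenadaGo k L n (n + 1) i = i := by
        rw [insereOrdenadaGo]; simp only [dif_neg (by omega : ¬ (n + 1 < n))]
      simp only [if_pos hge, if_neg heq, hexit, Option.getD_some]
      rw [if_neg]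
      rintro ⟨-, hk⟩
      rw [hget] at hk
      exact heq (Option.some.injEq _ _ ▸ hk)
  · simp only [if_neg hge]
    by_cases hend : i + 1 = n
    · have gend : insereOrdenadaGo k L n (i + 1) n = n := by
        rw [insereOrdenadaGo]; simp only [dif_neg (by omega : ¬ (i + 1 < n))]
      have send : linScan k L n (i + 1) = none := by
        rw [linScan]; simp only [dif_neg (by omega : ¬ (i + 1 < n))]
      simp only [if_pos hend, gend, send, Option.getD_none]
      rw [if_neg]; rintro ⟨h, -⟩; omega
    · rw [if_neg hend, go_eq k L n hn (i + 1) pos (by omega) (by omega)]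
termination_by (n - i).toNat
decreasing_by omega

-- "r is THE first-≥ position in the prefix of length n": characterisation both
-- scans are proved to satisfy; it has at most one solution.
def GoodAt (k : Int) (L : List Int) (n r : Int) : Prop :=
  0 ≤ r ∧ r ≤ n ∧
  (∀ j : Nat, (j : Int) < r → ∃ v, L[j]? = some v ∧ v < k) ∧
  (r < n → ∃ v, L[r.toNat]? = some v ∧ k ≤ v)

theorem goodAt_unique (k : Int) (L : List Int) (n r₁ r₂ : Int)
    (h₁ : GoodAt k L n r₁) (h₂ : GoodAt k L n r₂) : r₁ = r₂ := by
  obtain ⟨a0, a1, a2, a3⟩ := h₁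
  obtain ⟨b0, b1, b2, b3⟩ := h₂
  by_contra hne
  rcases lt_or_gt_of_ne hne with h | h
  · obtain ⟨v, hv, hkv⟩ := a3 (by omega)
    obtain ⟨w, hw, hwk⟩ := b2 r₁.toNat (by omega)
    rw [hv, Option.some.injEq] at hw; omega
  · obtain ⟨v, hv, hkv⟩ := b3 (by omega)
    obtain ⟨w, hw, hwk⟩ := a2 r₂.toNat (by omega)
    rw [hv, Option.some.injEq] at hw; omega

theorem lin_good (k : Int) (L : List Int) (n : Int) (hn : n ≤ (L.length : Int))
    (i : Int) (h0 : 0 ≤ i) (hin : i ≤ n)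
    (hpre : ∀ j : Nat, (j : Int) < i → ∃ v, L[j]? = some v ∧ v < k) :
    GoodAt k L n ((linScan k L n i).getD n) := by
  rw [linScan]
  by_cases h : i < n
  · have hget : PySem.List.pyGet? L i = some (L[i.toNat]'(by omega)) :=
      PySem.List.pyGet?_eq_some_getElem L h0 (by omega)
    simp only [dif_pos h, hget]
    by_cases hge : L[i.toNat]'(by omega) ≥ k
    · simp only [if_pos hge, Option.getD_some]
      exact ⟨h0, by omega, hpre, fun _ =>
        ⟨L[i.toNat]'(by omega), List.getElem?_eq_getElem _, hge⟩⟩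
    · simp only [if_neg hge]
      refine lin_good k L n hn (i + 1) (by omega) (by omega) ?_
      intro j hj
      by_cases hji : (j : Int) < i
      · exact hpre j hji
      · have : j = i.toNat := by omega
        subst this
        exact ⟨L[i.toNat]'(by omega), List.getElem?_eq_getElem _, by omega⟩
  · simp only [dif_neg h, Option.getD_none]
    have : i = n := by omega
    subst this
    exact ⟨h0, le_refl _, hpre, fun hlt => absurd hlt (lt_irrefl _)⟩
termination_by (n - i).toNat
decreasing_by omega

-- Sorted prefix as a monotone index fact.
theorem sorted_mono (L : List Int) (n : Int) (hn : n ≤ (L.length : Int))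
    (hs : (L.take n.toNat).Pairwise (· ≤ ·))
    (a b : Nat) (hab : a ≤ b) (hb : (b : Int) < n) :
    L[a]'(by omega) ≤ L[b]'(by omega) := by
  rcases Nat.lt_or_ge a b with h | h
  · have := (List.pairwise_iff_getElem.mp hs) a b
      (by simp [List.length_take]; omega) (by simp [List.length_take]; omega) h
    simpa [List.getElem_take] using this
  · have : a = b := by omega
    subst this; exact le_refl _

theorem bis_good (k : Int) (L : List Int) (n : Int) (hn : n ≤ (L.length : Int))
    (hs : (L.take n.toNat).Pairwise (· ≤ ·))
    (lo hi : Int) (h0 : 0 ≤ lo) (hlh : lo ≤ hi) (hhn : hi ≤ n)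
    (hlow : ∀ j : Nat, (j : Int) < lo → ∃ v, L[j]? = some v ∧ v < k)
    (hhigh : ∀ j : Nat, hi ≤ (j : Int) → (j : Int) < n → ∃ v, L[j]? = some v ∧ k ≤ v) :
    GoodAt k L n (bisGo k L lo hi) := by
  rw [bisGo]
  by_cases h : lo < hi
  · obtain ⟨hm1, hm2⟩ := PySem.Int.floordiv_two_mid_bounds (lo := lo) (hi := hi) (by omega)
    set mid := PySem.Int.floordiv (lo + hi) 2 with hmid
    have hmlt : mid < hi := by
      have := (PySem.Int.floordiv_lt_iff_lt_mul (a := lo + hi) (b := 2) (q := hi) (by omega)).mpr (by omega)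
      omega
    have hget : PySem.List.pyGet? L mid = some (L[mid.toNat]'(by omega)) :=
      PySem.List.pyGet?_eq_some_getElem L (by omega) (by omega)
    simp only [dif_pos h, hget]
    by_cases hlt : L[mid.toNat]'(by omega) < k
    · simp only [if_pos hlt]
      refine bis_good k L n hn hs (mid + 1) hi (by omega) (by omega) hhn ?_ hhigh
      intro j hj
      by_cases hjl : (j : Int) < lo
      · exact hlow j hjl
      · -- lo ≤ j ≤ mid : L[j] ≤ L[mid] < k by sortedness
        have hle : L[j]'(by omega) ≤ L[mid.toNat]'(by omega) :=
          sorted_mono L n hn hs j mid.toNat (by omega) (by omega)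
        exact ⟨L[j]'(by omega), List.getElem?_eq_getElem _, by omega⟩
    · simp only [if_neg hlt]
      refine bis_good k L n hn hs lo mid h0 (by omega) (by omega) hlow ?_
      intro j hj1 hj2
      -- mid ≤ j < n : k ≤ L[mid] ≤ L[j] by sortedness
      have hle : L[mid.toNat]'(by omega) ≤ L[j]'(by omega) :=
        sorted_mono L n hn hs mid.toNat j (by omega) hj2
      exact ⟨L[j]'(by omega), List.getElem?_eq_getElem _, by omega⟩
  · simp only [dif_neg h]
    have hlohi : lo = hi := by omega
    refine ⟨h0, by omega, hlow, fun hlt => ?_⟩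
    obtain ⟨v, hv, hkv⟩ := hhigh lo.toNat (by omega) (by omega)
    exact ⟨v, hv, hkv⟩
termination_by (hi - lo).toNat
decreasing_by all_goals omega

-- ===== VERDICT (by name: the statement is the Claim_ definition above) =====
theorem insereOrdenada_spec : Claim_equal_insereOrdenada := by
  intro k L n _hDom hPre
  obtain ⟨hn, hs⟩ := hPre
  show _ = _
  by_cases hneg : n ≤ 0
  · -- n ≤ 0: A's loop never runs and returns its -1 sentinel; B's guard returns -1
    rw [insereOrdenada, insereOrdenadaGo, insereOrdenada_alt]
    simp only [dif_neg (by omega : ¬ ((0:Int) < n)), if_pos hneg]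
  have hn0 : 0 < n := by omega
  rw [insereOrdenada, go_eq k L n hn 0 (-1) le_rfl hn0, insereOrdenada_alt,
    if_neg (by omega : ¬ n ≤ 0)]
  have hlin : GoodAt k L n ((linScan k L n 0).getD n) :=
    lin_good k L n hn 0 le_rfl (by omega) (by intro j hj; omega)
  have hbis : GoodAt k L n (bisGo k L 0 n) :=
    bis_good k L n hn hs 0 n le_rfl (by omega) le_rfl
      (by intro j hj; omega) (by intro j h1 h2; omega)
  rw [goodAt_unique k L n _ _ hlin hbis]
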